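-- pv_equiv track=rewrite | github.com/cry999/AtCoder | beginner/111/C.py | dekoboko
-- ===== SOURCE A (Python) =====
-- def dekoboko(n: int, v: list) -> int:
--     o, e = {}, {}
--     for i, vv in enumerate(v):
--         if i % 2 == 0:
--             if vv not in e:
--                 e[vv] = 1
--             else:
--                 e[vv] += 1
--         else:
--             if vv not in o:
--                 o[vv] = 1
--             else:
--                 o[vv] += 1
--
--     ol = sorted(o.items(), key=lambda x: -x[1])
--     el = sorted(e.items(), key=lambda x: -x[1])
--
--     # pivot 選択
--     # 頻度が最大のものを固定してそれに合わす様にしたいが、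
--     # 偶数番号列と奇数番号列とで同じあたいの pivot を使う
--     # ことはできない。なので、頻度が最大のものがかぶる様な
--     # ら、2番目に頻度が多いものを比較して、頻度の多い方は
--     # 2番目のものを使う様にする。
--     if ol[0][0] == el[0][0]:
--         if len(ol) > 1:
--             # 長さが 1 でない時は 2 番目に頻度が高いものの頻度を比べる。
--             if ol[1][1] > el[1][1]:
--                 ol[0], ol[1] = ol[1], ol[0]
--             else:
--                 el[0], el[1] = el[1], el[0]
--         else:  # len(ol) == 1
--             # 長さが 1 の時はダミーを挿入する
--             el.append((0, 0))
--             el[0], el[1] = el[1], el[0]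
--
--     return sum(v for _, v in ol[1:]) + sum(v for _, v in el[1:])
-- ===== SOURCE B (Python) =====
-- def _top2(cnt):
--     # best key (first to reach the max count, matching dict insertion order),
--     # its count, and the second-largest count (0 if absent)
--     k1, c1, c2 = None, 0, 0
--     for k, c in cnt.items():
--         if c > c1:
--             k1, c1, c2 = k, c, c1
--         elif c > c2:
--             c2 = c
--     return k1, c1, c2
--
--
-- def dekoboko(n: int, v: list) -> int:
--     even, odd = {}, {}
--     for i, x in enumerate(v):
--         d = even if i % 2 == 0 else odd
--         d[x] = d.get(x, 0) + 1
--     ok, oc1, oc2 = _top2(odd)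
--     ek, ec1, ec2 = _top2(even)
--     total = len(v)
--     if ok != ek:
--         return total - oc1 - ec1
--     if oc2 > ec2:
--         return total - oc2 - ec1
--     return total - oc1 - ec2
-- ===== Notes on version B (the rewrite author's own statement) =====
-- stated objective: alternative
-- what changed: B replaces A's two stable sorts of the per-parity count dicts and its list-surgery (swaps, dummy entry, tail sums) by a single linear top-2 scan over each dict plus closed-form arithmetic on len(v), reproducing A's stable tie-break (first-inserted key wins); timing runs read ~1.2-2x, not consistently above 1.5x, so no speed is claimed.
import Mathlib
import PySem

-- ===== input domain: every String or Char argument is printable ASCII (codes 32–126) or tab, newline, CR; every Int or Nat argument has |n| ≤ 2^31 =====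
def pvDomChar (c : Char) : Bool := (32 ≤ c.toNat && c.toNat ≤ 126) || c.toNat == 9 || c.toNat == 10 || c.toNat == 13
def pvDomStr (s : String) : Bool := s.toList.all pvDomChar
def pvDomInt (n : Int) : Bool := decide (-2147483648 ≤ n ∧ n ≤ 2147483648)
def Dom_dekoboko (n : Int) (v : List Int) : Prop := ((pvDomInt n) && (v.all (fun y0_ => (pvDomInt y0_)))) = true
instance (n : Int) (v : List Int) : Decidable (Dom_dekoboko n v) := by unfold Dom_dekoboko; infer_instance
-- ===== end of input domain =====

-- B replaces A's two stable sorts of the per-parity count dicts by a single linear top-2 scan per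
-- dict and closed-form arithmetic on len(v); equivalence is proved on all inputs where Python A returns.

-- ===== PORT A =====
-- Python's `ol[0], ol[1] = ol[1], ol[0]`
def pvSwap01 (l : List (Int × Int)) : List (Int × Int) :=
  match l with
  | a :: b :: t => b :: a :: t
  | l => l

def dekoboko (n : Int) (v : List Int) : Int :=
  let oe := (PySem.List.enumerate v 0).foldl
    (fun (s : PySem.Dict Int Int × PySem.Dict Int Int) p =>
      if PySem.Int.mod p.1 2 == 0 then
        if s.2.contains p.2 = false then (s.1, s.2.insert p.2 1)
        else (s.1, s.2.modify p.2 0 (· + 1))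
      else
        if s.1.contains p.2 = false then (s.1.insert p.2 1, s.2)
        else (s.1.modify p.2 0 (· + 1), s.2))
    (PySem.Dict.empty, PySem.Dict.empty)
  let ol := PySem.List.sorted oe.1.items (fun x => -x.2) false
  let el := PySem.List.sorted oe.2.items (fun x => -x.2) false
  -- Python indexes ol[0]/el[0]/el[1] directly and raises IndexError when absent;
  -- those inputs are excluded by Pre_dekoboko, so a default read is exact there.
  let p :=
    if (PySem.List.pyGetD ol 0 (0, 0)).1 == (PySem.List.pyGetD el 0 (0, 0)).1 then
      if 1 < ol.length then
        if (PySem.List.pyGetD ol 1 (0, 0)).2 > (PySem.List.pyGetD el 1 (0, 0)).2 then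
          (pvSwap01 ol, el)
        else (ol, pvSwap01 el)
      else (ol, pvSwap01 (el ++ [(0, 0)]))
    else (ol, el)
  -- ol[1:] / el[1:] on a list: slice from 1 = drop 1
  ((p.1.drop 1).map (·.2)).sum + ((p.2.drop 1).map (·.2)).sum

-- ===== PORT B =====
-- Source B _top2: one scan over the dict items keeping (best key, best count, second count)
def pvTop2 (cnt : PySem.Dict Int Int) : Option Int × Int × Int :=
  cnt.items.foldl
    (fun s p =>
      if p.2 > s.2.1 then (some p.1, p.2, s.2.1)
      else if p.2 > s.2.2 then (s.1, s.2.1, p.2)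
      else s)
    (none, 0, 0)

def dekoboko_alt (n : Int) (v : List Int) : Int :=
  let oe := (PySem.List.enumerate v 0).foldl
    (fun (s : PySem.Dict Int Int × PySem.Dict Int Int) p =>
      if PySem.Int.mod p.1 2 == 0 then (s.1, s.2.insert p.2 (s.2.getD p.2 0 + 1))
      else (s.1.insert p.2 (s.1.getD p.2 0 + 1), s.2))
    (PySem.Dict.empty, PySem.Dict.empty)
  let o := pvTop2 oe.1
  let e := pvTop2 oe.2
  let total : Int := v.length
  if o.1 ≠ e.1 then total - o.2.1 - e.2.1
  else if o.2.2 > e.2.2 then total - o.2.2 - e.2.1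
  else total - o.2.1 - e.2.2

-- ===== PRECONDITION & SPEC =====
-- (pvSplit v) = (values at even indices, values at odd indices)
def pvSplit : List Int → List Int × List Int
  | [] => ([], [])
  | x :: t => (x :: (pvSplit t).2, (pvSplit t).1)

-- Pre_ excludes exactly the inputs on which Python A raises an IndexError: lists of length < 2
-- (ol[0] or el[0] is read from an empty list), and lists whose even-index values are all equal to
-- the value that is also the stably-chosen most frequent odd-index value while the odd side has at
-- least two distinct values (then A reads el[1] from the singleton el).
def Pre_dekoboko (n : Int) (v : List Int) : Prop :=
  2 ≤ v.length ∧
    ¬(((pvSplit v).1.all (fun y => y == (pvSplit v).1.headD 0) = true) ∧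
      ¬((pvSplit v).2.all (fun y => y == (pvSplit v).2.headD 0) = true) ∧
      ∀ y ∈ (pvSplit v).2,
        (pvSplit v).2.count y < (pvSplit v).2.count ((pvSplit v).1.headD 0) ∨
        ((pvSplit v).2.count y = (pvSplit v).2.count ((pvSplit v).1.headD 0) ∧
         (pvSplit v).2.idxOf ((pvSplit v).1.headD 0) ≤ (pvSplit v).2.idxOf y))
instance (n : Int) (v : List Int) : Decidable (Pre_dekoboko n v) := by
  unfold Pre_dekoboko; infer_instance

def pvWitness_dekoboko : Int × List Int := (0, [1, 2])

def Spec_dekoboko (n : Int) (v : List Int) (out : Int) : Prop := out = dekoboko_alt n v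
instance (n : Int) (v : List Int) (out : Int) : Decidable (Spec_dekoboko n v out) := by
  unfold Spec_dekoboko; infer_instance

-- ===== CLAIM (what is proved, stated in full; the proofs are below) =====
def Claim_equal_dekoboko : Prop := ∀ (n : Int) (v : List Int),
  Dom_dekoboko n v → Pre_dekoboko n v → Spec_dekoboko n v (dekoboko n v)

-- ===== LEMMAS AND PROOFS =====

-- even-index / odd-index values as they arise from the enumerate-fold of the ports
def pvEvsE (v : List Int) : List Int :=
  ((PySem.List.enumerate v 0).filter (fun q => PySem.Int.mod q.1 2 == 0)).map (·.2)
def pvOdsE (v : List Int) : List Int :=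
  ((PySem.List.enumerate v 0).filter (fun q => !(PySem.Int.mod q.1 2 == 0))).map (·.2)

-- the first two entries of the sorted items list, in the shape pvTop2 keeps
def pvTopSpec : List (Int × Int) → Option Int × Int × Int
  | [] => (none, 0, 0)
  | [a] => (some a.1, a.2, 0)
  | a :: b :: _ => (some a.1, a.2, b.2)

theorem pvFoldA_eq_foldB (v : List Int) :
    (PySem.List.enumerate v 0).foldl
      (fun (s : PySem.Dict Int Int × PySem.Dict Int Int) p =>
        if PySem.Int.mod p.1 2 == 0 then
          if s.2.contains p.2 = false then (s.1, s.2.insert p.2 1)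
          else (s.1, s.2.modify p.2 0 (· + 1))
        else
          if s.1.contains p.2 = false then (s.1.insert p.2 1, s.2)
          else (s.1.modify p.2 0 (· + 1), s.2))
      (PySem.Dict.empty, PySem.Dict.empty) =
    (PySem.List.enumerate v 0).foldl
      (fun (s : PySem.Dict Int Int × PySem.Dict Int Int) p =>
        if PySem.Int.mod p.1 2 == 0 then (s.1, s.2.insert p.2 (s.2.getD p.2 0 + 1))
        else (s.1.insert p.2 (s.1.getD p.2 0 + 1), s.2))
      (PySem.Dict.empty, PySem.Dict.empty) := by
  apply PySem.List.foldl_congr_mem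
  intro s p _
  cases hm : (PySem.Int.mod p.1 2 == 0)
  · cases hc : s.1.contains p.2
    · have h0 : s.1.getD p.2 0 = 0 := PySem.Dict.getD_of_not_contains _ 0 hc
      simp [hm, hc, h0]
    · simp [hm, hc, PySem.Dict.modify]
  · cases hc : s.2.contains p.2
    · have h0 : s.2.getD p.2 0 = 0 := PySem.Dict.getD_of_not_contains _ 0 hc
      simp [hm, hc, h0]
    · simp [hm, hc, PySem.Dict.modify]

theorem pvFoldB_eq_counter (v : List Int) :
    (PySem.List.enumerate v 0).foldl
      (fun (s : PySem.Dict Int Int × PySem.Dict Int Int) p =>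
        if PySem.Int.mod p.1 2 == 0 then (s.1, s.2.insert p.2 (s.2.getD p.2 0 + 1))
        else (s.1.insert p.2 (s.1.getD p.2 0 + 1), s.2))
      (PySem.Dict.empty, PySem.Dict.empty) =
    (PySem.Dict.counter (pvOdsE v), PySem.Dict.counter (pvEvsE v)) := by
  have hsplit :
      (fun (s : PySem.Dict Int Int × PySem.Dict Int Int) (p : Int × Int) =>
        if PySem.Int.mod p.1 2 == 0 then (s.1, s.2.insert p.2 (s.2.getD p.2 0 + 1))
        else (s.1.insert p.2 (s.1.getD p.2 0 + 1), s.2)) =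
      (fun s p =>
        ((if !(PySem.Int.mod p.1 2 == 0) then s.1.insert p.2 (s.1.getD p.2 0 + 1) else s.1),
         (if PySem.Int.mod p.1 2 == 0 then s.2.insert p.2 (s.2.getD p.2 0 + 1) else s.2))) := by
    funext s p
    cases hm : (PySem.Int.mod p.1 2 == 0) <;> simp [hm]
  rw [hsplit]
  rw [PySem.List.foldl_prod_mk
    (f := fun (d : PySem.Dict Int Int) (p : Int × Int) =>
      if !(PySem.Int.mod p.1 2 == 0) then d.insert p.2 (d.getD p.2 0 + 1) else d)
    (g := fun (d : PySem.Dict Int Int) (p : Int × Int) =>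
      if PySem.Int.mod p.1 2 == 0 then d.insert p.2 (d.getD p.2 0 + 1) else d)]
  rw [PySem.List.foldl_if_eq_foldl_filter, PySem.List.foldl_if_eq_foldl_filter]
  unfold pvOdsE pvEvsE
  rw [← List.foldl_map (f := fun p : Int × Int => p.2)
        (g := fun (d : PySem.Dict Int Int) (x : Int) => d.insert x (d.getD x 0 + 1)),
      ← List.foldl_map (f := fun p : Int × Int => p.2)
        (g := fun (d : PySem.Dict Int Int) (x : Int) => d.insert x (d.getD x 0 + 1))]
  rw [PySem.Dict.foldl_insert_getD_add_one_eq_counter, PySem.Dict.foldl_insert_getD_add_one_eq_counter]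

theorem pvCounter_pos (xs : List Int) :
    ∀ p ∈ (PySem.Dict.counter xs).items, 0 < p.2 := by
  intro p hp
  rw [PySem.Dict.items_counter] at hp
  obtain ⟨k, hk, rfl⟩ := List.mem_map.1 hp
  have hx : k ∈ xs := (PySem.Set.mem_ofList xs k).1 hk
  simpa using List.count_pos_iff.2 hx

theorem pvCounter_sum (xs : List Int) :
    (((PySem.Dict.counter xs).items).map (·.2)).sum = (xs.length : Int) := by
  rw [PySem.Dict.items_counter, List.map_map]
  have hperm : (PySem.Set.ofList xs).Perm xs.dedup := by
    refine (List.perm_ext_iff_of_nodup (PySem.Set.nodup_ofList xs) (List.nodup_dedup xs)).2 ?_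
    intro a
    simp [PySem.Set.mem_ofList, List.mem_dedup]
  have hf : ((·.2) ∘ fun k => (k, (xs.count k : Int))) = fun k : Int => ((xs.count k : Nat) : Int) := rfl
  rw [hf]
  rw [(hperm.map (fun k : Int => ((xs.count k : Nat) : Int))).sum_eq]
  rw [show (fun k : Int => ((xs.count k : Nat) : Int)) = (fun m : Nat => (m : Int)) ∘ (fun k => xs.count k) from rfl]
  rw [← List.map_map, ← Nat.cast_list_sum, List.sum_map_count_dedup_eq_length]

theorem pvCounter_ne_nil (xs : List Int) (h : xs ≠ []) :
    (PySem.Dict.counter xs).items ≠ [] := by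
  rw [PySem.Dict.items_counter]
  obtain ⟨a, ha⟩ := List.exists_mem_of_ne_nil xs h
  have : a ∈ PySem.Set.ofList xs := (PySem.Set.mem_ofList xs a).2 ha
  intro hnil
  rw [List.map_eq_nil_iff] at hnil
  simp [hnil] at this

theorem pvLenSplit (v : List Int) :
    (pvEvsE v).length + (pvOdsE v).length = v.length := by
  have hsplit : ∀ (l : List (Int × Int)) (p : Int × Int → Bool),
      (l.filter p).length + (l.filter (fun a => !p a)).length = l.length := by
    intro l p
    induction l with
    | nil => rfl
    | cons h t ih => by_cases hp : p h <;> simp [hp] <;> omega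
  have hlen : (PySem.List.enumerate v 0).length = v.length := by simp [pysem]
  unfold pvEvsE pvOdsE
  rw [List.length_map, List.length_map, hsplit, hlen]

theorem pvTop2_eq_topSpec (l : List (Int × Int)) (hpos : ∀ p ∈ l, 0 < p.2) :
    l.foldl
      (fun s p =>
        if p.2 > s.2.1 then (some p.1, p.2, s.2.1)
        else if p.2 > s.2.2 then (s.1, s.2.1, p.2)
        else s)
      ((none : Option Int), (0 : Int), (0 : Int)) =
    pvTopSpec (PySem.List.sorted l (fun x => -x.2) false) := by
  induction l using List.reverseRecOn with
  | nil => rfl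
  | append_singleton l x ih =>
    have hx : 0 < x.2 := hpos x (by simp)
    have hih := ih (fun p hp => hpos p (by simp [hp]))
    rw [List.foldl_append, hih]
    rw [PySem.List.sorted_eq_foldl_insertBy (xs := l ++ [x]), List.foldl_append,
        ← PySem.List.sorted_eq_foldl_insertBy]
    cases hs : PySem.List.sorted l (fun x => -x.2) false with
    | nil =>
      simp [pvTopSpec, PySem.List.insertBy, hx]
    | cons a t =>
      have ha : 0 < a.2 := hpos a (by
        have : a ∈ PySem.List.sorted l (fun x => -x.2) false := by rw [hs]; simp
        exact List.mem_append.2 (Or.inl ((PySem.List.mem_sorted _ _ _ _).1 this)))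
      cases t with
      | nil =>
        by_cases h1 : a.2 < x.2
        · simp [pvTopSpec, PySem.List.insertBy, h1, hx, neg_lt_neg_iff]
        · simp [pvTopSpec, PySem.List.insertBy, h1, hx, not_lt.1 h1, neg_lt_neg_iff]
      | cons b t' =>
        by_cases h1 : a.2 < x.2
        · simp [pvTopSpec, PySem.List.insertBy, h1, neg_lt_neg_iff]
        · by_cases h2 : b.2 < x.2
          · simp [pvTopSpec, PySem.List.insertBy, h1, h2, neg_lt_neg_iff, not_lt.1 h1]
          · simp [pvTopSpec, PySem.List.insertBy, h1, h2, neg_lt_neg_iff, not_lt.1 h1, not_lt.1 h2]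

theorem pvSorted_sum (l : List (Int × Int)) :
    ((PySem.List.sorted l (fun x => -x.2) false).map (·.2)).sum = (l.map (·.2)).sum := by
  exact ((PySem.List.sorted_perm l (fun x => -x.2) false).map (·.2)).sum_eq

theorem pvGet0_cons (p : Int × Int) (l : List (Int × Int)) (d : Int × Int) :
    PySem.List.pyGetD (p :: l) 0 d = p := by simp [pysem]
theorem pvGet1_cons₂ (p q : Int × Int) (l : List (Int × Int)) (d : Int × Int) :
    PySem.List.pyGetD (p :: q :: l) 1 d = q := by simp [pysem]
theorem pvGet1_single (p d : Int × Int) : PySem.List.pyGetD [p] 1 d = d := by simp [pysem]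

theorem pvCore (lo le : List (Int × Int))
    (hpo : ∀ p ∈ lo, 0 < p.2) (hpe : ∀ p ∈ le, 0 < p.2)
    (hlo : lo ≠ []) (hle : le ≠ [])
    (total : Int)
    (htot : total = (lo.map (·.2)).sum + (le.map (·.2)).sum) :
    (let ol := PySem.List.sorted lo (fun x => -x.2) false
     let el := PySem.List.sorted le (fun x => -x.2) false
     let p :=
       if (PySem.List.pyGetD ol 0 (0, 0)).1 == (PySem.List.pyGetD el 0 (0, 0)).1 then
         if 1 < ol.length then
           if (PySem.List.pyGetD ol 1 (0, 0)).2 > (PySem.List.pyGetD el 1 (0, 0)).2 then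
             (pvSwap01 ol, el)
           else (ol, pvSwap01 el)
         else (ol, pvSwap01 (el ++ [(0, 0)]))
       else (ol, el)
     ((p.1.drop 1).map (·.2)).sum + ((p.2.drop 1).map (·.2)).sum) =
    (let o := pvTopSpec (PySem.List.sorted lo (fun x => -x.2) false)
     let e := pvTopSpec (PySem.List.sorted le (fun x => -x.2) false)
     if o.1 ≠ e.1 then total - o.2.1 - e.2.1
     else if o.2.2 > e.2.2 then total - o.2.2 - e.2.1
     else total - o.2.1 - e.2.2) := by
  have hso' := PySem.List.sorted_eq_nil_iff (xs := lo) (key := fun x : Int × Int => -x.2) (rev := false)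
  have hse' := PySem.List.sorted_eq_nil_iff (xs := le) (key := fun x : Int × Int => -x.2) (rev := false)
  obtain ⟨a, ro, hso⟩ : ∃ a ro, PySem.List.sorted lo (fun x => -x.2) false = a :: ro := by
    cases h : PySem.List.sorted lo (fun x => -x.2) false with
    | nil => exact absurd (hso'.1 h) hlo
    | cons a t => exact ⟨a, t, rfl⟩
  obtain ⟨b, re, hse⟩ : ∃ b re, PySem.List.sorted le (fun x => -x.2) false = b :: re := by
    cases h : PySem.List.sorted le (fun x => -x.2) false with
    | nil => exact absurd (hse'.1 h) hle
    | cons b t => exact ⟨b, t, rfl⟩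
  have hsumo : a.2 + (ro.map (·.2)).sum = (lo.map (·.2)).sum := by
    have := pvSorted_sum lo
    rw [hso] at this
    simpa using this
  have hsume : b.2 + (re.map (·.2)).sum = (le.map (·.2)).sum := by
    have := pvSorted_sum le
    rw [hse] at this
    simpa using this
  have hposo : ∀ p ∈ a :: ro, 0 < p.2 := by
    intro p hp
    refine hpo p ?_
    have : p ∈ PySem.List.sorted lo (fun x => -x.2) false := by rw [hso]; exact hp
    exact (PySem.List.mem_sorted _ _ _ _).1 this
  have hpose : ∀ p ∈ b :: re, 0 < p.2 := by
    intro p hp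
    refine hpe p ?_
    have : p ∈ PySem.List.sorted le (fun x => -x.2) false := by rw [hse]; exact hp
    exact (PySem.List.mem_sorted _ _ _ _).1 this
  rw [hso, hse]
  simp only [pvGet0_cons] at *
  by_cases htie : a.1 = b.1
  · rcases ro with _ | ⟨c, ro'⟩
    · rcases re with _ | ⟨d, re'⟩
      · simp only [pvTopSpec, pvSwap01, pvGet1_single, List.cons_append, List.nil_append]
        simp [htie]
        simp at hsumo hsume
        omega
      · have hd : 0 < d.2 := hpose d (by simp)
        simp only [pvTopSpec, pvSwap01, pvGet1_single, pvGet1_cons₂, List.cons_append,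
          List.nil_append]
        simp [htie]
        simp at hsumo hsume
        omega
    · have hc : 0 < c.2 := hposo c (by simp)
      have hlo2 : 1 < (a :: c :: ro').length := by simp
      rcases re with _ | ⟨d, re'⟩
      · simp only [pvTopSpec, pvSwap01, pvGet1_single, pvGet1_cons₂]
        simp [htie, hlo2, hc]
        simp at hsumo hsume
        omega
      · have hd : 0 < d.2 := hpose d (by simp)
        by_cases hcd : d.2 < c.2
        · simp only [pvTopSpec, pvSwap01, pvGet1_cons₂]
          simp [htie, hlo2, hcd]
          simp at hsumo hsume
          omega
        · simp only [pvTopSpec, pvSwap01, pvGet1_cons₂]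
          simp [htie, hlo2, hcd]
          simp at hsumo hsume
          omega
  · rcases ro with _ | ⟨c, ro'⟩ <;> rcases re with _ | ⟨d, re'⟩
    all_goals simp [pvTopSpec, htie]
    all_goals try simp at hsumo hsume
    all_goals omega

-- ===== VERDICT (by name: the statement is the Claim_ definition above) =====
theorem dekoboko_spec : Claim_equal_dekoboko := by
  intro n v _ hpre
  obtain ⟨hlen, -⟩ := hpre
  rcases v with _ | ⟨x, _ | ⟨y, t⟩⟩
  · simp at hlen
  · simp at hlen
  simp only [Spec_dekoboko, dekoboko, dekoboko_alt, pvTop2]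
  rw [pvFoldA_eq_foldB, pvFoldB_eq_counter]
  have hm0 : (PySem.Int.mod 0 2 == 0) = true := by decide
  have hm1 : (PySem.Int.mod 1 2 == 0) = false := by decide
  have hev : x ∈ pvEvsE (x :: y :: t) := by
    unfold pvEvsE
    rw [show PySem.List.enumerate (x :: y :: t) 0 = (0, x) :: PySem.List.enumerate (y :: t) 1 by
      simp [PySem.List.enumerate]]
    simp [hm0]
  have hod : y ∈ pvOdsE (x :: y :: t) := by
    unfold pvOdsE
    rw [show PySem.List.enumerate (x :: y :: t) 0 = (0, x) :: (1, y) :: PySem.List.enumerate t 2 by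
      simp [PySem.List.enumerate]]
    simp [hm1]
  have hloN := pvCounter_ne_nil _ (List.ne_nil_of_mem hod)
  have hleN := pvCounter_ne_nil _ (List.ne_nil_of_mem hev)
  rw [pvTop2_eq_topSpec _ (pvCounter_pos _), pvTop2_eq_topSpec _ (pvCounter_pos _)]
  refine pvCore _ _ (pvCounter_pos _) (pvCounter_pos _) hloN hleN _ ?_
  rw [pvCounter_sum, pvCounter_sum]
  have := pvLenSplit (x :: y :: t)
  omega
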